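-- pv_equiv track=rewrite | github.com/bessarabov/advent_of_code_2024 | day16_2/c.py | bfs_find_best_paths
-- ===== SOURCE A (Python) =====
-- from collections import deque
--
-- def get_neighbors(grid, r, c):
--     directions = [(-1, 0), (1, 0), (0, -1), (0, 1)]  # Up, Down, Left, Right
--     neighbors = []
--     for dr, dc in directions:
--         nr, nc = r + dr, c + dc
--         if 0 <= nr < len(grid) and 0 <= nc < len(grid[0]) and grid[nr][nc] != '#':
--             neighbors.append((nr, nc))
--     return neighbors
--
-- def bfs_find_best_paths(grid, start, end):
--     queue = deque([(start, 0, 0)])  # (position, steps, turns)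
--     best_scores = {}
--     paths = {}
--     best_path_tiles = set()
--
--     while queue:
--         (r, c), steps, turns = queue.popleft()
--         score = steps + turns * 1000
--         if (r, c) in best_scores and score > best_scores[(r, c)]:
--             continue
--         best_scores[(r, c)] = score
--         paths[(r, c)] = (steps, turns)
--
--         if (r, c) == end:
--             continue
--
--         for nr, nc in get_neighbors(grid, r, c):
--             queue.append(((nr, nc), steps + 1, turns))
--
--     # Backtrack to find all best paths
--     stack = [end]
--     while stack:
--         curr = stack.pop()
--         if curr in best_path_tiles:
--             continue
--         best_path_tiles.add(curr)
--         if curr == start: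
--             continue
--         for nr, nc in get_neighbors(grid, *curr):
--             if (nr, nc) in paths and best_scores[(nr, nc)] + 1 == best_scores[curr]:
--                 stack.append((nr, nc))
--
--     return best_path_tiles
-- ===== SOURCE B (Python) =====
-- def get_neighbors(grid, r, c):
--     directions = [(-1, 0), (1, 0), (0, -1), (0, 1)]  # Up, Down, Left, Right
--     neighbors = []
--     for dr, dc in directions:
--         nr, nc = r + dr, c + dc
--         if 0 <= nr < len(grid) and 0 <= nc < len(grid[0]) and grid[nr][nc] != '#':
--             neighbors.append((nr, nc))
--     return neighbors
--
-- def bfs_find_best_paths(grid, start, end):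
--     # Level-synchronous BFS: each tile is enqueued at most once (first time seen),
--     # so dist holds the minimal step count; `end` is never expanded (as in the maze task).
--     dist = {start: 0}
--     frontier = [start]
--     k = 0
--     while frontier:
--         nxt = []
--         for x in frontier:
--             if x == end:
--                 continue
--             for n in get_neighbors(grid, x[0], x[1]):
--                 if n not in dist:
--                     dist[n] = k + 1
--                     nxt.append(n)
--         frontier = nxt
--         k += 1
--
--     # Backtrack from end over predecessors that are exactly one step closer.
--     best_path_tiles = set()
--     stack = [end]
--     while stack:
--         curr = stack.pop()
--         if curr in best_path_tiles:
--             continue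
--         best_path_tiles.add(curr)
--         if curr == start:
--             continue
--         for nr, nc in get_neighbors(grid, curr[0], curr[1]):
--             if (nr, nc) in dist and dist[(nr, nc)] + 1 == dist[curr]:
--                 stack.append((nr, nc))
--     return best_path_tiles
-- ===== Notes on version B (the rewrite author's own statement) =====
-- stated objective: alternative
-- what changed: Replaces A's BFS without a visited guard (every pop re-enqueues all neighbours, so a tile is expanded once per shortest path to it) by a level-synchronous BFS over a visited/distance dict in which every tile is enqueued at most once; the backtracking over the distances is the same.
-- outside the precondition, e.g. on bfs_find_best_paths(['ab', ''], (1, 0), (1, 0)): A returns {(1, 0)}, B returns {(1, 0)}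
import Mathlib
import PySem

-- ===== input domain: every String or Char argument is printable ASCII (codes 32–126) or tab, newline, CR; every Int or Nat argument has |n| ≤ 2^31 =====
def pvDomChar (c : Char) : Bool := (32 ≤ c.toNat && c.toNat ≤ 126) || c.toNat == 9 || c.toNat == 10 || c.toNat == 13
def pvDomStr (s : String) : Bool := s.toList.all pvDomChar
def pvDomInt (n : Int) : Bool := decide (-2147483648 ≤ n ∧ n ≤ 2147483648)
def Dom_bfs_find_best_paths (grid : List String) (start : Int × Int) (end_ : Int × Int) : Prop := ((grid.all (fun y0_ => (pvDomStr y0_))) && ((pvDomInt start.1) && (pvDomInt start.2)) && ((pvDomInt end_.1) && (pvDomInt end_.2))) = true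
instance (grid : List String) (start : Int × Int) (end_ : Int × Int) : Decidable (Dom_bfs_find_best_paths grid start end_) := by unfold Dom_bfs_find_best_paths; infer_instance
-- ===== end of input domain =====

-- B replaces A's BFS without a visited guard (a tile is expanded once per shortest path to it)
-- by a level-synchronous BFS with a visited/distance dict (each tile enqueued at most once); the
-- backtracking over the distance map is the same in both Pythons (shared helper btLoop below).

-- ===== PORT A =====

-- get_neighbors: module-level helper used by BOTH Pythons (A and B call the identical function).
-- Python's chained bound checks short-circuit, so grid[0] / grid[nr][nc] are only read under the
-- earlier bounds; the getD default '#' is only reachable on ragged rows excluded by Pre_ (IndexError).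
def nbrs (grid : List String) (r c : Int) : List (Int × Int) :=
  [((-1 : Int), (0 : Int)), (1, 0), (0, -1), (0, 1)].foldl (fun acc d =>
    let nr := r + d.1
    let nc := c + d.2
    if 0 ≤ nr ∧ nr < (grid.length : Int) ∧ 0 ≤ nc ∧ nc < ((grid.headD "").toList.length : Int) ∧
        (grid.getD nr.toNat "").toList.getD nc.toNat '#' ≠ '#'
    then acc ++ [(nr, nc)] else acc) []

-- A's first while-loop: a deque of ((r,c), steps, turns) with no visited guard (turns stays 0).
-- The fuel argument only makes the recursion structural; the sufficiency of the fuel passed by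
-- bfs_find_best_paths is part of the equivalence proof below (lemma loopA_master).
def loopA (grid : List String) (end_ : Int × Int) :
    Nat → List ((Int × Int) × Int × Int) → PySem.Dict (Int × Int) Int →
    PySem.Dict (Int × Int) (Int × Int) →
    PySem.Dict (Int × Int) Int × PySem.Dict (Int × Int) (Int × Int)
  | 0, _, best, paths => (best, paths)
  | _ + 1, [], best, paths => (best, paths)
  | fuel + 1, (rc, steps, turns) :: queue, best, paths =>
    let score := steps + turns * 1000
    if (match best.get? rc with | some bsc => decide (score > bsc) | none => false)
    then loopA grid end_ fuel queue best paths
    else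
      let best' := best.insert rc score
      let paths' := paths.insert rc (steps, turns)
      if rc = end_ then loopA grid end_ fuel queue best' paths'
      else loopA grid end_ fuel
        (queue ++ (nbrs grid rc.1 rc.2).map (fun n => (n, steps + 1, turns))) best' paths'

-- The backtracking while-loop, textually identical in Python A and Python B (A passes paths/best_scores,
-- B passes its dist dict for both), so it is one shared helper.  Python list.append/list.pop() is a
-- LIFO stack; we keep the top of the stack at the list head, so a batch of pushes is reversed.
-- The `| _, _ => false` arm is where Python raises KeyError (curr missing from best_scores);
-- those inputs are excluded by Pre_.  The fuel passed below exceeds the possible number of pops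
-- (each tile is expanded at most once and pushes at most 4 entries).
def btLoop {β : Type} (grid : List String) (start_ end_ : Int × Int)
    (paths : PySem.Dict (Int × Int) β) (best : PySem.Dict (Int × Int) Int) :
    Nat → List (Int × Int) → PySem.Set (Int × Int) → PySem.Set (Int × Int)
  | 0, _, tiles => tiles
  | _ + 1, [], tiles => tiles
  | fuel + 1, curr :: stack, tiles =>
    if PySem.Set.contains tiles curr then btLoop grid start_ end_ paths best fuel stack tiles
    else
      let tiles' := PySem.Set.add tiles curr
      if curr = start_ then btLoop grid start_ end_ paths best fuel stack tiles'
      else btLoop grid start_ end_ paths best fuel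
        (((nbrs grid curr.1 curr.2).filter (fun n =>
            paths.contains n && (match best.get? n, best.get? curr with
              | some a, some bb => decide (a + 1 = bb) | _, _ => false))).reverse ++ stack)
        tiles'

def bfs_find_best_paths (grid : List String) (start : Int × Int) (end_ : Int × Int) :
    List (Int × Int) :=
  let res := loopA grid end_ (5 ^ (grid.length * (grid.headD "").toList.length + 5))
    [(start, 0, 0)] PySem.Dict.empty PySem.Dict.empty
  btLoop grid start end_ res.2 res.1
    (4 * (grid.length * (grid.headD "").toList.length) + 6) [end_] PySem.Set.empty

-- ===== PORT B =====

-- inner `for n in get_neighbors(...)` of B's level loop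
def visitNbrs (k : Int) : List (Int × Int) → PySem.Dict (Int × Int) Int → List (Int × Int) →
    PySem.Dict (Int × Int) Int × List (Int × Int)
  | [], V, nxt => (V, nxt)
  | n :: ns, V, nxt =>
    if (V.get? n).isSome then visitNbrs k ns V nxt
    else visitNbrs k ns (V.insert n (k + 1)) (nxt ++ [n])

-- `for x in frontier:` of B's level loop
def stepLevel (grid : List String) (end_ : Int × Int) (k : Int) :
    List (Int × Int) → PySem.Dict (Int × Int) Int → List (Int × Int) →
    PySem.Dict (Int × Int) Int × List (Int × Int)
  | [], V, nxt => (V, nxt)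
  | x :: F, V, nxt =>
    if x = end_ then stepLevel grid end_ k F V nxt
    else
      let r := visitNbrs k (nbrs grid x.1 x.2) V nxt
      stepLevel grid end_ k F r.1 r.2

-- B's `while frontier:` loop; the fuel passed below is provably sufficient (every level but the
-- last adds a new in-grid key to the dict).
def bLoop (grid : List String) (end_ : Int × Int) :
    Nat → PySem.Dict (Int × Int) Int → List (Int × Int) → Int → PySem.Dict (Int × Int) Int
  | 0, V, _, _ => V
  | fuel + 1, V, F, k =>
    if F = [] then V
    else
      let r := stepLevel grid end_ k F V []
      bLoop grid end_ fuel r.1 r.2 (k + 1)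

def bfs_find_best_paths_alt (grid : List String) (start : Int × Int) (end_ : Int × Int) :
    List (Int × Int) :=
  let V := bLoop grid end_ (grid.length * (grid.headD "").toList.length + 2)
    ((PySem.Dict.empty).insert start 0) [start] 0
  btLoop grid start end_ V V
    (4 * (grid.length * (grid.headD "").toList.length) + 6) [end_] PySem.Set.empty

-- ===== PRECONDITION & SPEC =====

-- A cell is safe when probing its four neighbours cannot raise IndexError: whenever the probed
-- position passes Python's bound checks against len(grid) and len(grid[0]), it lies inside its
-- own (possibly shorter) row.
def safeCell (grid : List String) (x : Int × Int) : Prop :=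
  ∀ d ∈ [((-1 : Int), (0 : Int)), (1, 0), (0, -1), (0, 1)],
    0 ≤ x.1 + d.1 → x.1 + d.1 < (grid.length : Int) → 0 ≤ x.2 + d.2 →
    x.2 + d.2 < ((grid.headD "").toList.length : Int) →
    x.2 + d.2 < ((grid.getD (x.1 + d.1).toNat "").toList.length : Int)

-- the set of tiles A's BFS ever pops: the (R*C+2)-fold image of {start} under the one-step
-- neighbour relation with end as a sink (a tile's sink-distance is bounded by the number of
-- in-grid tiles plus one, so this many steps reach the full closure)
def reachStep (grid : List String) (end_ : Int × Int) (S : List (Int × Int)) : List (Int × Int) :=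
  PySem.Set.ofList (S ++ S.flatMap (fun x => if x = end_ then [] else nbrs grid x.1 x.2))

def reachSet (grid : List String) (start end_ : Int × Int) : List (Int × Int) :=
  (reachStep grid end_)^[grid.length * (grid.headD "").toList.length + 2] [start]

-- Pre_ excludes the inputs where A raises: IndexError from probing a short row of a ragged grid
-- (the per-cell safety check slightly over-excludes ragged grids whose short rows are never
-- actually probed, e.g. when start = end), and KeyError in the backtracking when end is
-- unreachable but has a reachable neighbour.
def Pre_bfs_find_best_paths (grid : List String) (start : Int × Int) (end_ : Int × Int) : Prop :=
  (safeCell grid start ∧ safeCell grid end_ ∧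
    ∀ x ∈ reachSet grid start end_, safeCell grid x) ∧
  (start = end_ ∨ end_ ∈ reachSet grid start end_ ∨
    ∀ n ∈ nbrs grid end_.1 end_.2, n ∉ reachSet grid start end_)

instance (grid : List String) (start : Int × Int) (end_ : Int × Int) :
    Decidable (Pre_bfs_find_best_paths grid start end_) := by
  unfold Pre_bfs_find_best_paths safeCell; infer_instance

def pvWitness_bfs_find_best_paths : List String × (Int × Int) × (Int × Int) :=
  (["..", ".."], (0, 0), (1, 1))

def Spec_bfs_find_best_paths (grid : List String) (start : Int × Int) (end_ : Int × Int)
    (out : List (Int × Int)) : Prop := out = bfs_find_best_paths_alt grid start end_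
instance (grid : List String) (start : Int × Int) (end_ : Int × Int) (out : List (Int × Int)) :
    Decidable (Spec_bfs_find_best_paths grid start end_ out) := by
  unfold Spec_bfs_find_best_paths; infer_instance

-- ===== CLAIM (what is proved, stated in full; the proofs are below) =====
def Claim_equal_bfs_find_best_paths : Prop := ∀ (grid : List String) (start : Int × Int) (end_ : Int × Int), Dom_bfs_find_best_paths grid start end_ → Pre_bfs_find_best_paths grid start end_ → Spec_bfs_find_best_paths grid start end_ (bfs_find_best_paths grid start end_)

-- ===== LEMMAS AND PROOFS =====

-- the in-grid cells (row < len(grid), column < len(grid[0]))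
def allCells (grid : List String) : List (Int × Int) :=
  (List.range grid.length).flatMap (fun (i : Nat) =>
    (List.range (grid.headD "").toList.length).map (fun (j : Nat) => ((i : Int), (j : Int))))

lemma mem_allCells (grid : List String) (x : Int × Int) :
    x ∈ allCells grid ↔ 0 ≤ x.1 ∧ x.1 < (grid.length : Int) ∧ 0 ≤ x.2 ∧
      x.2 < ((grid.headD "").toList.length : Int) := by
  obtain ⟨a, b⟩ := x
  constructor
  · intro h
    obtain ⟨i, hi, hmem⟩ := List.mem_flatMap.mp h
    obtain ⟨j, hj, hh⟩ := List.mem_map.mp hmem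
    rw [List.mem_range] at hi hj
    obtain ⟨rfl, rfl⟩ := Prod.mk.injEq .. ▸ hh
    refine ⟨?_, ?_, ?_, ?_⟩ <;> omega
  · rintro ⟨h1, h2, h3, h4⟩
    exact List.mem_flatMap.mpr ⟨a.toNat, List.mem_range.mpr (by omega),
      List.mem_map.mpr ⟨b.toNat, List.mem_range.mpr (by omega), by simp [Prod.ext_iff]; omega⟩⟩

lemma length_allCells (grid : List String) :
    (allCells grid).length = grid.length * (grid.headD "").toList.length := by
  simp [allCells, List.length_flatMap]

lemma nbrs_eq_filter (grid : List String) (r c : Int) :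
    nbrs grid r c =
      ([((-1 : Int), (0 : Int)), (1, 0), (0, -1), (0, 1)].filter (fun d =>
        decide (0 ≤ r + d.1 ∧ r + d.1 < (grid.length : Int) ∧ 0 ≤ c + d.2 ∧
          c + d.2 < ((grid.headD "").toList.length : Int) ∧
          (grid.getD (r + d.1).toNat "").toList.getD (c + d.2).toNat '#' ≠ '#'))).map
        (fun d => (r + d.1, c + d.2)) := by
  unfold nbrs
  rw [PySem.List.foldl_append_ite (p := fun d : Int × Int =>
      (0 ≤ r + d.1 ∧ r + d.1 < (grid.length : Int) ∧ 0 ≤ c + d.2 ∧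
        c + d.2 < ((grid.headD "").toList.length : Int) ∧
        (grid.getD (r + d.1).toNat "").toList.getD (c + d.2).toNat '#' ≠ '#'))
      (f := fun d : Int × Int => (r + d.1, c + d.2))]
  simp

lemma mem_nbrs_allCells (grid : List String) (r c : Int) (z : Int × Int)
    (hz : z ∈ nbrs grid r c) : z ∈ allCells grid := by
  rw [nbrs_eq_filter] at hz
  rw [mem_allCells]
  simp only [List.mem_map, List.mem_filter, decide_eq_true_eq] at hz
  obtain ⟨d, ⟨-, h1, h2, h3, h4, -⟩, rfl⟩ := hz
  exact ⟨h1, h2, h3, h4⟩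

lemma length_nbrs_le (grid : List String) (r c : Int) : (nbrs grid r c).length ≤ 4 := by
  rw [nbrs_eq_filter, List.length_map]
  have := List.length_filter_le (fun d : Int × Int =>
        decide (0 ≤ r + d.1 ∧ r + d.1 < (grid.length : Int) ∧ 0 ≤ c + d.2 ∧
          c + d.2 < ((grid.headD "").toList.length : Int) ∧
          (grid.getD (r + d.1).toNat "").toList.getD (c + d.2).toNat '#' ≠ '#'))
      [((-1 : Int), (0 : Int)), (1, 0), (0, -1), (0, 1)]
  simpa using this

lemma countP_lt_of_witness {α : Type} (p q : α → Bool) (z : α) :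
    ∀ (l : List α), (∀ a ∈ l, p a → q a) → z ∈ l → ¬ p z → q z → l.countP p < l.countP q := by
  intro l
  induction l with
  | nil => intro _ hz; simp at hz
  | cons x t ih =>
    intro h hz h1 h2
    rcases List.mem_cons.mp hz with rfl | hz'
    · simp only [List.countP_cons]
      have : t.countP p ≤ t.countP q :=
        List.countP_mono_left (fun a ha => h a (List.mem_cons_of_mem _ ha))
      simp [h1, h2]; omega
    · have := ih (fun a ha => h a (List.mem_cons_of_mem _ ha)) hz' h1 h2
      simp only [List.countP_cons]
      have hx : (if p x then 1 else 0) ≤ (if q x then 1 else 0) := by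
        by_cases hpx : p x
        · simp [hpx, h x (List.mem_cons_self) hpx]
        · simp [hpx]
      split_ifs at hx ⊢ <;> omega

-- number of in-grid cells not yet in the dict
def muV (grid : List String) (V : PySem.Dict (Int × Int) Int) : Nat :=
  (allCells grid).countP (fun c => (V.get? c).isNone)

lemma muV_le (grid : List String) (V : PySem.Dict (Int × Int) Int) :
    muV grid V ≤ grid.length * (grid.headD "").toList.length := by
  rw [← length_allCells]
  exact List.countP_le_length

lemma muV_strict (grid : List String) (V V' : PySem.Dict (Int × Int) Int) (z0 : Int × Int)
    (h : ∀ z, V'.get? z = none → V.get? z = none)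
    (h0 : V.get? z0 = none) (h1 : (V'.get? z0).isSome) (hz : z0 ∈ allCells grid) :
    muV grid V' < muV grid V := by
  refine countP_lt_of_witness _ _ z0 _ (fun a _ ha => ?_) hz ?_ ?_
  · simp only [Option.isNone_iff_eq_none] at *
    exact h a ha
  · simp only [Option.isNone_iff_eq_none]
    intro hc; rw [hc] at h1; simp at h1
  · simp [h0]

-- ---- B-side: characterisation of bLoop's final dict ----

lemma visitNbrs_spec (k : Int) : ∀ (ns : List (Int × Int)) (V : PySem.Dict (Int × Int) Int)
    (nxt0 : List (Int × Int)),
    (∀ z v, V.get? z = some v → (visitNbrs k ns V nxt0).1.get? z = some v) ∧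
    (∀ z v, (visitNbrs k ns V nxt0).1.get? z = some v →
      V.get? z = some v ∨ (v = k + 1 ∧ z ∈ ns)) ∧
    (∀ z ∈ ns, ((visitNbrs k ns V nxt0).1.get? z).isSome) ∧
    (∀ z ∈ (visitNbrs k ns V nxt0).2, z ∈ nxt0 ∨
      (V.get? z = none ∧ (visitNbrs k ns V nxt0).1.get? z = some (k + 1) ∧ z ∈ ns)) ∧
    (∀ z, ((visitNbrs k ns V nxt0).1.get? z).isSome →
      (V.get? z).isSome ∨ z ∈ (visitNbrs k ns V nxt0).2) ∧
    (∀ z, (visitNbrs k ns V nxt0).1.get? z = none → V.get? z = none) ∧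
    (∀ z ∈ nxt0, z ∈ (visitNbrs k ns V nxt0).2) := by
  intro ns
  induction ns with
  | nil =>
    intro V nxt0
    refine ⟨fun z v h => h, fun z v h => Or.inl h, by simp, fun z hz => Or.inl hz,
      fun z h => Or.inl h, fun z h => h, fun z hz => hz⟩
  | cons n ns ih =>
    intro V nxt0
    by_cases hn : (V.get? n).isSome
    · have heq : visitNbrs k (n :: ns) V nxt0 = visitNbrs k ns V nxt0 := by
        simp [visitNbrs, hn]
      rw [heq]
      obtain ⟨s1, s2, s3, s4, s5, s6, s7⟩ := ih V nxt0
      refine ⟨s1, ?_, ?_, ?_, s5, s6, s7⟩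
      · intro z v h; rcases s2 z v h with h' | ⟨rfl, hm⟩
        · exact Or.inl h'
        · exact Or.inr ⟨rfl, List.mem_cons_of_mem _ hm⟩
      · intro z hz
        rcases List.mem_cons.mp hz with rfl | hz'
        · obtain ⟨v, hv⟩ := Option.isSome_iff_exists.mp hn
          rw [s1 z v hv]; simp
        · exact s3 z hz'
      · intro z hz; rcases s4 z hz with h' | ⟨ha, hb, hc⟩
        · exact Or.inl h'
        · exact Or.inr ⟨ha, hb, List.mem_cons_of_mem _ hc⟩
    · have heq : visitNbrs k (n :: ns) V nxt0 = visitNbrs k ns (V.insert n (k+1)) (nxt0 ++ [n]) := by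
        simp [visitNbrs, hn]
      rw [heq]
      obtain ⟨s1, s2, s3, s4, s5, s6, s7⟩ := ih (V.insert n (k+1)) (nxt0 ++ [n])
      have hget : ∀ z, (V.insert n (k+1)).get? z = if z = n then some (k+1) else V.get? z := by
        intro z; exact PySem.Dict.get?_insert ..
      have hVn : V.get? n = none := Option.not_isSome_iff_eq_none.mp hn
      refine ⟨?_, ?_, ?_, ?_, ?_, ?_, ?_⟩
      · intro z v h
        refine s1 z v ?_
        rw [hget]; split
        · next hzn => subst hzn; rw [hVn] at h; exact absurd h (by simp)
        · exact h
      · intro z v h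
        rcases s2 z v h with h' | ⟨rfl, hm⟩
        · rw [hget] at h'; split at h'
          · next hzn => exact Or.inr ⟨by injection h' with hh; omega, by simp [hzn]⟩
          · exact Or.inl h'
        · exact Or.inr ⟨rfl, List.mem_cons_of_mem _ hm⟩
      · intro z hz
        rcases List.mem_cons.mp hz with rfl | hz'
        · have : (V.insert z (k+1)).get? z = some (k+1) := PySem.Dict.get?_insert_self ..
          rw [s1 z (k+1) this]; simp
        · exact s3 z hz'
      · intro z hz
        rcases s4 z hz with h' | ⟨ha, hb, hc⟩
        · rcases List.mem_append.mp h' with h'' | h''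
          · exact Or.inl h''
          · have hzn : z = n := by simpa using h''
            subst hzn
            refine Or.inr ⟨hVn, ?_, by simp⟩
            exact s1 z (k+1) (PySem.Dict.get?_insert_self ..)
        · refine Or.inr ⟨?_, hb, List.mem_cons_of_mem _ hc⟩
          rw [hget] at ha; split at ha
          · exact absurd ha (by simp)
          · exact ha
      · intro z h
        rcases s5 z h with h' | h'
        · by_cases hzn : z = n
          · subst hzn; exact Or.inr (s7 z (by simp))
          · rw [hget, if_neg hzn] at h'; exact Or.inl h'
        · exact Or.inr h'
      · intro z h
        have := s6 z h
        rw [hget] at this; split at this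
        · exact absurd this (by simp)
        · exact this
      · intro z hz; exact s7 z (List.mem_append.mpr (Or.inl hz))

lemma stepLevel_spec (grid : List String) (end_ : Int × Int) (k : Int) :
    ∀ (F : List (Int × Int)) (V : PySem.Dict (Int × Int) Int) (nxt0 : List (Int × Int)),
    (∀ z v, V.get? z = some v → (stepLevel grid end_ k F V nxt0).1.get? z = some v) ∧
    (∀ z v, (stepLevel grid end_ k F V nxt0).1.get? z = some v →
      V.get? z = some v ∨ (v = k + 1 ∧ ∃ x ∈ F, x ≠ end_ ∧ z ∈ nbrs grid x.1 x.2)) ∧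
    (∀ x ∈ F, x ≠ end_ → ∀ z ∈ nbrs grid x.1 x.2,
      ((stepLevel grid end_ k F V nxt0).1.get? z).isSome) ∧
    (∀ z ∈ (stepLevel grid end_ k F V nxt0).2, z ∈ nxt0 ∨
      (V.get? z = none ∧ (stepLevel grid end_ k F V nxt0).1.get? z = some (k + 1) ∧
        ∃ x ∈ F, x ≠ end_ ∧ z ∈ nbrs grid x.1 x.2)) ∧
    (∀ z, ((stepLevel grid end_ k F V nxt0).1.get? z).isSome →
      (V.get? z).isSome ∨ z ∈ (stepLevel grid end_ k F V nxt0).2) ∧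
    (∀ z, (stepLevel grid end_ k F V nxt0).1.get? z = none → V.get? z = none) ∧
    (∀ z ∈ nxt0, z ∈ (stepLevel grid end_ k F V nxt0).2) := by
  intro F
  induction F with
  | nil =>
    intro V nxt0
    exact ⟨fun z v h => h, fun z v h => Or.inl h, by simp, fun z hz => Or.inl hz,
      fun z h => Or.inl h, fun z h => h, fun z hz => hz⟩
  | cons x F ih =>
    intro V nxt0
    by_cases hx : x = end_
    · have heq : stepLevel grid end_ k (x :: F) V nxt0 = stepLevel grid end_ k F V nxt0 := by
        simp [stepLevel, hx]
      rw [heq]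
      obtain ⟨s1, s2, s3, s4, s5, s6, s7⟩ := ih V nxt0
      refine ⟨s1, ?_, ?_, ?_, s5, s6, s7⟩
      · intro z v h; rcases s2 z v h with h' | ⟨rfl, y, hy, hy2, hy3⟩
        · exact Or.inl h'
        · exact Or.inr ⟨rfl, y, List.mem_cons_of_mem _ hy, hy2, hy3⟩
      · intro y hy hyne z hz
        rcases List.mem_cons.mp hy with rfl | hy'
        · exact absurd hx hyne
        · exact s3 y hy' hyne z hz
      · intro z hz; rcases s4 z hz with h' | ⟨ha, hb, y, hy, hy2, hy3⟩
        · exact Or.inl h'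
        · exact Or.inr ⟨ha, hb, y, List.mem_cons_of_mem _ hy, hy2, hy3⟩
    · have heq : stepLevel grid end_ k (x :: F) V nxt0 =
          stepLevel grid end_ k F (visitNbrs k (nbrs grid x.1 x.2) V nxt0).1
            (visitNbrs k (nbrs grid x.1 x.2) V nxt0).2 := by
        simp [stepLevel, hx]
      rw [heq]
      obtain ⟨v1, v2, v3, v4, v5, v6, v7⟩ := visitNbrs_spec k (nbrs grid x.1 x.2) V nxt0
      obtain ⟨s1, s2, s3, s4, s5, s6, s7⟩ := ih (visitNbrs k (nbrs grid x.1 x.2) V nxt0).1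
        (visitNbrs k (nbrs grid x.1 x.2) V nxt0).2
      refine ⟨?_, ?_, ?_, ?_, ?_, ?_, ?_⟩
      · intro z v h; exact s1 z v (v1 z v h)
      · intro z v h
        rcases s2 z v h with h' | ⟨rfl, y, hy, hy2, hy3⟩
        · rcases v2 z v h' with h'' | ⟨rfl, hm⟩
          · exact Or.inl h''
          · exact Or.inr ⟨rfl, x, List.mem_cons_self, hx, hm⟩
        · exact Or.inr ⟨rfl, y, List.mem_cons_of_mem _ hy, hy2, hy3⟩
      · intro y hy hyne z hz
        rcases List.mem_cons.mp hy with rfl | hy'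
        · obtain ⟨w, hw⟩ := Option.isSome_iff_exists.mp (v3 z hz)
          rw [s1 z w hw]; simp
        · exact s3 y hy' hyne z hz
      · intro z hz
        rcases s4 z hz with h' | ⟨ha, hb, y, hy, hy2, hy3⟩
        · rcases v4 z h' with h'' | ⟨ha, hb, hc⟩
          · exact Or.inl h''
          · refine Or.inr ⟨ha, s1 z (k+1) hb, x, List.mem_cons_self, hx, hc⟩
        · have hVz : V.get? z = none := by
            cases hVz : V.get? z with
            | none => rfl
            | some w => rw [v1 z w hVz] at ha; exact absurd ha (by simp)
          exact Or.inr ⟨hVz, hb, y, List.mem_cons_of_mem _ hy, hy2, hy3⟩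
      · intro z h
        rcases s5 z h with h' | h'
        · rcases v5 z h' with h'' | h''
          · exact Or.inl h''
          · exact Or.inr (s7 z h'')
        · exact Or.inr h'
      · intro z h; exact v6 z (s6 z h)
      · intro z hz; exact s7 z (v7 z hz)

structure InvB (grid : List String) (start end_ : Int × Int)
    (V : PySem.Dict (Int × Int) Int) (F : List (Int × Int)) (k : Int) : Prop where
  b0 : 0 ≤ k
  b1 : ∀ x ∈ F, V.get? x = some k
  b2 : ∀ z v, V.get? z = some v → 0 ≤ v ∧ v ≤ k ∧
        v ≤ ((grid.length * (grid.headD "").toList.length : Nat) : Int) + 2 ∧ (v = 0 → z = start)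
  b3 : V.get? start = some 0
  b4 : ∀ z, V.get? z = some k → z ∈ F
  b5 : ∀ x v, V.get? x = some v → v < k → x ≠ end_ →
        ∀ z ∈ nbrs grid x.1 x.2, ∃ w, V.get? z = some w ∧ w ≤ v + 1
  b6 : ∀ z v, V.get? z = some v → 1 ≤ v →
        ∃ x, V.get? x = some (v - 1) ∧ x ≠ end_ ∧ z ∈ nbrs grid x.1 x.2
  b8 : F ≠ [] → k.toNat + muV grid V ≤ grid.length * (grid.headD "").toList.length + 1

lemma invB_final (grid : List String) (start end_ : Int × Int)
    (V : PySem.Dict (Int × Int) Int) (k : Int) (hI : InvB grid start end_ V [] k) :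
    (∀ z v, V.get? z = some v → 0 ≤ v ∧
        v ≤ ((grid.length * (grid.headD "").toList.length : Nat) : Int) + 2 ∧
        (v = 0 → z = start)) ∧
    (V.get? start = some 0) ∧
    (∀ x v, V.get? x = some v → x ≠ end_ →
      ∀ z ∈ nbrs grid x.1 x.2, ∃ w, V.get? z = some w ∧ w ≤ v + 1) ∧
    (∀ z v, V.get? z = some v → 1 ≤ v →
      ∃ x, V.get? x = some (v - 1) ∧ x ≠ end_ ∧ z ∈ nbrs grid x.1 x.2) := by
  refine ⟨?_, hI.b3, ?_, hI.b6⟩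
  · intro z v h; obtain ⟨h1, h2, h3, h4⟩ := hI.b2 z v h; exact ⟨h1, h3, h4⟩
  · intro x v h hne z hz
    have hvk : v ≠ k := fun hvk => by
      subst hvk; exact absurd (hI.b4 x h) (List.not_mem_nil)
    have hvlt : v < k := lt_of_le_of_ne (hI.b2 x v h).2.1 hvk
    exact hI.b5 x v h hvlt hne z hz

lemma bLoop_master (grid : List String) (start end_ : Int × Int) :
    ∀ (fuel : Nat) (V : PySem.Dict (Int × Int) Int) (F : List (Int × Int)) (k : Int),
    InvB grid start end_ V F k → 2 + muV grid V ≤ fuel →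
    (∀ z v, (bLoop grid end_ fuel V F k).get? z = some v → 0 ≤ v ∧
        v ≤ ((grid.length * (grid.headD "").toList.length : Nat) : Int) + 2 ∧
        (v = 0 → z = start)) ∧
    ((bLoop grid end_ fuel V F k).get? start = some 0) ∧
    (∀ x v, (bLoop grid end_ fuel V F k).get? x = some v → x ≠ end_ →
      ∀ z ∈ nbrs grid x.1 x.2, ∃ w, (bLoop grid end_ fuel V F k).get? z = some w ∧ w ≤ v + 1) ∧
    (∀ z v, (bLoop grid end_ fuel V F k).get? z = some v → 1 ≤ v →
      ∃ x, (bLoop grid end_ fuel V F k).get? x = some (v - 1) ∧ x ≠ end_ ∧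
        z ∈ nbrs grid x.1 x.2) := by
  intro fuel
  induction fuel with
  | zero => intro V F k _ hsuf; omega
  | succ f ih =>
    intro V F k hI hsuf
    by_cases hF : F = []
    · subst hF
      have heq : bLoop grid end_ (f + 1) V [] k = V := by simp [bLoop]
      rw [heq]
      exact invB_final grid start end_ V k hI
    · have heq : bLoop grid end_ (f + 1) V F k =
          bLoop grid end_ f (stepLevel grid end_ k F V []).1 (stepLevel grid end_ k F V []).2
            (k + 1) := by
        simp only [bLoop]; rw [if_neg hF]
      rw [heq]
      obtain ⟨s1, s2, s3, s4, s5, s6, s7⟩ := stepLevel_spec grid end_ k F V []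
      set V' := (stepLevel grid end_ k F V []).1 with hV'
      set nxt := (stepLevel grid end_ k F V []).2 with hnxt
      have hRC := hI.b8 hF
      have hk1K : k + 1 ≤ ((grid.length * (grid.headD "").toList.length : Nat) : Int) + 2 := by
        have := hI.b0; omega
      have hInv' : InvB grid start end_ V' nxt (k + 1) := by
        refine ⟨by have := hI.b0; omega, ?_, ?_, s1 _ _ hI.b3, ?_, ?_, ?_, ?_⟩
        · -- b1
          intro x hx
          rcases s4 x hx with h | ⟨_, h2, _⟩
          · exact absurd h (List.not_mem_nil)
          · exact h2
        · -- b2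
          intro z v h
          rcases s2 z v h with h' | ⟨rfl, _⟩
          · obtain ⟨h1, h2, h3, h4⟩ := hI.b2 z v h'
            exact ⟨h1, by omega, h3, h4⟩
          · have := hI.b0
            exact ⟨by omega, le_refl _, hk1K, by omega⟩
        · -- b4
          intro z h
          rcases s5 z (by rw [h]; simp) with h' | h'
          · obtain ⟨w, hw⟩ := Option.isSome_iff_exists.mp h'
            rw [s1 z w hw] at h
            injection h with h
            obtain ⟨-, h2, -, -⟩ := hI.b2 z w hw
            omega
          · exact h'
        · -- b5
          intro x v h hvlt hne z hz
          by_cases hvk : v = k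
          · subst hvk
            have hVx : V.get? x = some v := by
              rcases s2 x v h with h' | ⟨hvk1, _⟩
              · exact h'
              · omega
            have hxF : x ∈ F := hI.b4 x hVx
            have hzs := s3 x hxF hne z hz
            obtain ⟨w, hw⟩ := Option.isSome_iff_exists.mp hzs
            refine ⟨w, hw, ?_⟩
            rcases s2 z w hw with h' | ⟨rfl, _⟩
            · obtain ⟨-, h2, -, -⟩ := hI.b2 z w h'; omega
            · omega
          · have hvltk : v < k := by omega
            have hVx : V.get? x = some v := by
              rcases s2 x v h with h' | ⟨hvk1, _⟩
              · exact h'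
              · omega
            obtain ⟨w, hw, hwb⟩ := hI.b5 x v hVx hvltk hne z hz
            exact ⟨w, s1 z w hw, hwb⟩
        · -- b6
          intro z v h h1
          rcases s2 z v h with h' | ⟨rfl, x, hxF, hxne, hznb⟩
          · obtain ⟨x, hx, hxne, hznb⟩ := hI.b6 z v h' h1
            exact ⟨x, s1 x _ hx, hxne, hznb⟩
          · refine ⟨x, ?_, hxne, hznb⟩
            have : k + 1 - 1 = k := by omega
            rw [this]
            exact s1 x k (hI.b1 x hxF)
        · -- b8
          intro hnxtne
          obtain ⟨z, hz⟩ := List.exists_mem_of_ne_nil nxt hnxtne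
          rcases s4 z hz with h | ⟨hnone, hsome, x, hxF, hxne, hznb⟩
          · exact absurd h (List.not_mem_nil)
          · have hstrict : muV grid V' < muV grid V :=
              muV_strict grid V V' z s6 hnone (by rw [hsome]; simp)
                (mem_nbrs_allCells grid x.1 x.2 z hznb)
            have := hI.b0
            omega
      by_cases hnxt0 : nxt = []
      · rw [hnxt0]
        have heq2 : bLoop grid end_ f V' [] (k + 1) = V' := by
          cases f <;> simp [bLoop]
        rw [heq2]
        exact invB_final grid start end_ V' (k + 1) (hnxt0 ▸ hInv')
      · refine ih V' nxt (k + 1) hInv' ?_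
        obtain ⟨z, hz⟩ := List.exists_mem_of_ne_nil nxt hnxt0
        rcases s4 z hz with h | ⟨hnone, hsome, x, hxF, hxne, hznb⟩
        · exact absurd h (List.not_mem_nil)
        · have hstrict : muV grid V' < muV grid V :=
            muV_strict grid V V' z s6 hnone (by rw [hsome]; simp)
              (mem_nbrs_allCells grid x.1 x.2 z hznb)
          omega

-- ---- A-side: the exponential loop computes the same distances ----

structure InvA (grid : List String) (end_ : Int × Int) (d : Int × Int → Option Int) (K : Int)
    (k : Int) (Qk Rq : List ((Int × Int) × Int × Int))
    (b : PySem.Dict (Int × Int) Int) (p : PySem.Dict (Int × Int) (Int × Int)) : Prop where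
  i0a : 0 ≤ k
  i0b : k ≤ K + 1
  i1q : ∀ e ∈ Qk, e.2.1 = k ∧ e.2.2 = 0 ∧ ∃ v, d e.1 = some v ∧ v ≤ k
  i1r : ∀ e ∈ Rq, e.2.1 = k + 1 ∧ e.2.2 = 0 ∧ ∃ v, d e.1 = some v ∧ v ≤ k + 1
  i2 : ∀ z v, b.get? z = some v → d z = some v
  i3 : ∀ z v, d z = some v → v < k → b.get? z = some v
  i4 : ∀ z, d z = some k → b.get? z = some k ∨ (z, k, (0 : Int)) ∈ Qk
  i5 : ∀ z, d z = some (k + 1) → (z, k + 1, (0 : Int)) ∈ Rq ∨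
        ∃ x, d x = some k ∧ x ≠ end_ ∧ z ∈ nbrs grid x.1 x.2 ∧ (x, k, (0 : Int)) ∈ Qk
  i6 : ∀ z, (p.get? z).isSome = (b.get? z).isSome
  i7 : Rq ≠ [] → ∃ x, d x = some k
  i8 : ∀ z v, b.get? z = some v → v ≤ k

def measN (K k : Int) (Qk Rq : List ((Int × Int) × Int × Int)) : Nat :=
  Qk.length * 5 ^ (K + 2 - k).toNat + Rq.length * 5 ^ (K + 1 - k).toNat

lemma loopA_nil (grid : List String) (end_ : Int × Int) (fuel : Nat)
    (b : PySem.Dict (Int × Int) Int) (p : PySem.Dict (Int × Int) (Int × Int)) :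
    loopA grid end_ fuel [] b p = (b, p) := by cases fuel <;> rfl

lemma loopA_cons (grid : List String) (end_ : Int × Int) (f : Nat) (rc : Int × Int)
    (s t : Int) (Q : List ((Int × Int) × Int × Int)) (b : PySem.Dict (Int × Int) Int)
    (p : PySem.Dict (Int × Int) (Int × Int)) :
    loopA grid end_ (f + 1) ((rc, s, t) :: Q) b p =
      if (match b.get? rc with
          | some bsc => decide (s + t * 1000 > bsc) | none => false)
      then loopA grid end_ f Q b p
      else (if rc = end_
        then loopA grid end_ f Q (b.insert rc (s + t * 1000)) (p.insert rc (s, t))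
        else loopA grid end_ f (Q ++ (nbrs grid rc.1 rc.2).map (fun n => (n, s + 1, t)))
          (b.insert rc (s + t * 1000)) (p.insert rc (s, t))) := rfl

lemma expandStep (grid : List String) (end_ : Int × Int)
    (d : Int × Int → Option Int) (K : Int)
    (hP2 : ∀ x v, d x = some v → x ≠ end_ →
      ∀ z ∈ nbrs grid x.1 x.2, ∃ w, d z = some w ∧ w ≤ v + 1)
    (hP3 : ∀ z v, d z = some v → 1 ≤ v →
      ∃ x, d x = some (v - 1) ∧ x ≠ end_ ∧ z ∈ nbrs grid x.1 x.2)
    (hK : ∀ z v, d z = some v → v ≤ K) (m : Nat)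
    (ih : ∀ (fuel : Nat) (k : Int) (Qk Rq : List ((Int × Int) × Int × Int))
      (b : PySem.Dict (Int × Int) Int) (p : PySem.Dict (Int × Int) (Int × Int)),
      fuel * (K + 3).toNat + (K + 2 - k).toNat ≤ m →
      InvA grid end_ d K k Qk Rq b p →
      measN K k Qk Rq ≤ fuel →
      (∀ z, (loopA grid end_ fuel (Qk ++ Rq) b p).1.get? z = d z) ∧
      (∀ z, ((loopA grid end_ fuel (Qk ++ Rq) b p).2.get? z).isSome = (d z).isSome))
    (f : Nat) (k : Int) (Qk' Rq : List ((Int × Int) × Int × Int))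
    (b : PySem.Dict (Int × Int) Int) (p : PySem.Dict (Int × Int) (Int × Int)) (rc : Int × Int)
    (hmea : f * (K + 3).toNat + (K + 2 - k).toNat ≤ m)
    (hI : InvA grid end_ d K k ((rc, k, 0) :: Qk') Rq b p)
    (hdk : d rc = some k)
    (hNlin : Qk'.length * (5 * 5 ^ (K + 1 - k).toNat) + 5 * 5 ^ (K + 1 - k).toNat +
      Rq.length * 5 ^ (K + 1 - k).toNat ≤ f + 1)
    (hq1 : 1 ≤ 5 ^ (K + 1 - k).toNat)
    (hpow : 5 ^ (K + 2 - k).toNat = 5 * 5 ^ (K + 1 - k).toNat) :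
    (∀ z, ((if rc = end_
        then loopA grid end_ f (Qk' ++ Rq) (b.insert rc k) (p.insert rc (k, 0))
        else loopA grid end_ f ((Qk' ++ Rq) ++ (nbrs grid rc.1 rc.2).map (fun n => (n, k + 1, 0)))
          (b.insert rc k) (p.insert rc (k, 0)))).1.get? z = d z) ∧
    (∀ z, (((if rc = end_
        then loopA grid end_ f (Qk' ++ Rq) (b.insert rc k) (p.insert rc (k, 0))
        else loopA grid end_ f ((Qk' ++ Rq) ++ (nbrs grid rc.1 rc.2).map (fun n => (n, k + 1, 0)))
          (b.insert rc k) (p.insert rc (k, 0)))).2.get? z).isSome = (d z).isSome) := by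
  have hb' : ∀ z, (b.insert rc k).get? z = if z = rc then some k else b.get? z :=
    fun z => PySem.Dict.get?_insert ..
  have hp' : ∀ z, (p.insert rc (k, 0)).get? z =
      if z = rc then some (k, 0) else p.get? z :=
    fun z => PySem.Dict.get?_insert ..
  -- invariant fields common to both branches
  have hi2 : ∀ z v, (b.insert rc k).get? z = some v → d z = some v := by
    intro z v h
    rw [hb'] at h
    split at h
    · next hzr => subst hzr; injection h with h'; rw [← h']; exact hdk
    · exact hI.i2 z v h
  have hi3 : ∀ z v, d z = some v → v < k → (b.insert rc k).get? z = some v := by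
    intro z v hdz hvlt
    rw [hb']
    split
    · next hzr => exfalso; subst hzr; rw [hdk] at hdz; injection hdz with h'; omega
    · exact hI.i3 z v hdz hvlt
  have hi4 : ∀ z, d z = some k → (b.insert rc k).get? z = some k ∨ (z, k, (0 : Int)) ∈ Qk' := by
    intro z hz
    by_cases hzr : z = rc
    · subst hzr; exact Or.inl (by rw [hb']; simp)
    · rcases hI.i4 z hz with hb | hmem
      · exact Or.inl (by rw [hb', if_neg hzr]; exact hb)
      · rcases List.mem_cons.mp hmem with heq | hmem'
        · exact absurd (congrArg (fun q => q.1) heq) hzr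
        · exact Or.inr hmem'
  have hi6 : ∀ z, ((p.insert rc (k, 0)).get? z).isSome = ((b.insert rc k).get? z).isSome := by
    intro z
    rw [hb', hp']
    split
    · rfl
    · exact hI.i6 z
  have hi8 : ∀ z v, (b.insert rc k).get? z = some v → v ≤ k := by
    intro z v h
    rw [hb'] at h
    split at h
    · injection h with h'; omega
    · exact hI.i8 z v h
  have hi1q : ∀ e ∈ Qk', e.2.1 = k ∧ e.2.2 = 0 ∧ ∃ v, d e.1 = some v ∧ v ≤ k :=
    fun e he => hI.i1q e (List.mem_cons_of_mem _ he)
  by_cases hrce : rc = end_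
  · rw [if_pos hrce]
    refine ih f k Qk' Rq (b.insert rc k) (p.insert rc (k, 0)) hmea
      ⟨hI.i0a, hI.i0b, hi1q, hI.i1r, hi2, hi3, hi4, ?_, hi6, hI.i7, hi8⟩
      (by simp only [measN, hpow]; omega)
    -- i5: the popped tile is end_, which is never a backtracking parent
    intro z hz
    rcases hI.i5 z hz with hmem | ⟨x, hdx, hxne, hznb, hxmem⟩
    · exact Or.inl hmem
    · rcases List.mem_cons.mp hxmem with heq | hmem'
      · exact absurd (hrce ▸ congrArg (fun q => q.1) heq) hxne
      · exact Or.inr ⟨x, hdx, hxne, hznb, hmem'⟩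
  · rw [if_neg hrce, List.append_assoc]
    refine ih f k Qk' (Rq ++ (nbrs grid rc.1 rc.2).map (fun n => (n, k + 1, 0)))
      (b.insert rc k) (p.insert rc (k, 0)) hmea
      ⟨hI.i0a, hI.i0b, hi1q, ?_, hi2, hi3, hi4, ?_, hi6, ?_, hi8⟩ ?_
    · -- i1r including the freshly appended neighbours
      intro e he
      rcases List.mem_append.mp he with he' | he'
      · exact hI.i1r e he'
      · obtain ⟨n, hn, rfl⟩ := List.mem_map.mp he'
        obtain ⟨w, hw, hwle⟩ := hP2 rc k hdk hrce n hn
        exact ⟨rfl, rfl, w, hw, hwle⟩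
    · -- i5: a parent that was the popped head is now covered by the appended entries
      intro z hz
      rcases hI.i5 z hz with hmem | ⟨x, hdx, hxne, hznb, hxmem⟩
      · exact Or.inl (List.mem_append_left _ hmem)
      · rcases List.mem_cons.mp hxmem with heq | hmem'
        · have hxrc : x = rc := congrArg (fun q => q.1) heq
          subst hxrc
          exact Or.inl (List.mem_append_right _ (List.mem_map.mpr ⟨z, hznb, rfl⟩))
        · exact Or.inr ⟨x, hdx, hxne, hznb, hmem'⟩
    · -- i7
      intro _
      exact ⟨rc, hdk⟩
    · -- measN decreased despite the appended neighbours
      have hlen : ((nbrs grid rc.1 rc.2).map (fun n => (n, k + 1, (0 : Int)))).length ≤ 4 := by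
        rw [List.length_map]
        exact length_nbrs_le grid rc.1 rc.2
      simp only [measN, List.length_append, hpow]
      have hexp : (Rq.length + ((nbrs grid rc.1 rc.2).map
          (fun n => (n, k + 1, (0 : Int)))).length) * 5 ^ (K + 1 - k).toNat =
          Rq.length * 5 ^ (K + 1 - k).toNat + ((nbrs grid rc.1 rc.2).map
          (fun n => (n, k + 1, (0 : Int)))).length * 5 ^ (K + 1 - k).toNat := by ring
      rw [hexp]
      have h4 : ((nbrs grid rc.1 rc.2).map (fun n => (n, k + 1, (0 : Int)))).length *
          5 ^ (K + 1 - k).toNat ≤ 4 * 5 ^ (K + 1 - k).toNat :=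
        Nat.mul_le_mul_right _ hlen
      omega

lemma loopA_master (grid : List String) (end_ : Int × Int)
    (d : Int × Int → Option Int) (K : Int) (hK0 : 0 ≤ K)
    (hP2 : ∀ x v, d x = some v → x ≠ end_ →
      ∀ z ∈ nbrs grid x.1 x.2, ∃ w, d z = some w ∧ w ≤ v + 1)
    (hP3 : ∀ z v, d z = some v → 1 ≤ v →
      ∃ x, d x = some (v - 1) ∧ x ≠ end_ ∧ z ∈ nbrs grid x.1 x.2)
    (hK : ∀ z v, d z = some v → v ≤ K) :
    ∀ (m fuel : Nat) (k : Int) (Qk Rq : List ((Int × Int) × Int × Int))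
      (b : PySem.Dict (Int × Int) Int) (p : PySem.Dict (Int × Int) (Int × Int)),
    fuel * (K + 3).toNat + (K + 2 - k).toNat ≤ m →
    InvA grid end_ d K k Qk Rq b p →
    measN K k Qk Rq ≤ fuel →
    (∀ z, (loopA grid end_ fuel (Qk ++ Rq) b p).1.get? z = d z) ∧
    (∀ z, ((loopA grid end_ fuel (Qk ++ Rq) b p).2.get? z).isSome = (d z).isSome) := by
  intro m
  induction m with
  | zero =>
    intro fuel k Qk Rq b p hm hI _
    exfalso
    have h0b := hI.i0b
    omega
  | succ m ih =>
    intro fuel k Qk Rq b p hm hI hN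
    cases hQ : Qk with
    | nil =>
      subst hQ
      cases hR : Rq with
      | nil =>
        -- terminal: queue empty, b agrees with d everywhere
        subst hR
        rw [List.nil_append, loopA_nil]
        have hnone : ∀ (j : Nat), ∀ z v, d z = some v → v = k + 1 + j → False := by
          intro j
          induction j with
          | zero =>
            intro z v h hv
            have hv' : v = k + 1 := by omega
            subst hv'
            rcases hI.i5 z h with hmem | ⟨x, _, _, _, hxmem⟩
            · exact absurd hmem (List.not_mem_nil)
            · exact absurd hxmem (List.not_mem_nil)
          | succ j ihj =>
            intro z v h hv
            obtain ⟨x, hx, -, -⟩ := hP3 z v h (by have := hI.i0a; omega)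
            exact ihj x (v - 1) hx (by omega)
        have hmain : ∀ z, b.get? z = d z := by
          intro z
          cases hdz : d z with
          | none =>
            cases hbz : b.get? z with
            | none => rfl
            | some w => rw [hI.i2 z w hbz] at hdz; exact absurd hdz (by simp)
          | some v =>
            rcases lt_trichotomy v k with hlt | heq | hgt
            · exact hI.i3 z v hdz hlt
            · subst heq
              rcases hI.i4 z hdz with hb | hmem
              · exact hb
              · exact absurd hmem (List.not_mem_nil)
            · exact absurd (hnone (v - (k + 1)).toNat z v hdz (by omega)) (fun h => h)
        refine ⟨hmain, fun z => ?_⟩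
        rw [hI.i6 z, hmain z]
      | cons e R' =>
        -- level shift: k ↦ k + 1
        subst hR
        have hkK : k ≤ K := by
          obtain ⟨x, hx⟩ := hI.i7 (by simp)
          exact hK x k hx
        have hshift : InvA grid end_ d K (k + 1) (e :: R') [] b p := by
          refine ⟨by have := hI.i0a; omega, by omega, ?_, by simp, hI.i2, ?_, ?_, ?_, hI.i6,
            by simp, ?_⟩
          · exact hI.i1r
          · -- i3 at k+1
            intro z v hv hvlt
            rcases lt_or_eq_of_le (by omega : v ≤ k) with hlt | heq
            · exact hI.i3 z v hv hlt
            · subst heq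
              rcases hI.i4 z hv with hb | hmem
              · exact hb
              · exact absurd hmem (List.not_mem_nil)
          · -- i4 at k+1
            intro z hz
            rcases hI.i5 z hz with hmem | ⟨x, _, _, _, hxmem⟩
            · exact Or.inr hmem
            · exact absurd hxmem (List.not_mem_nil)
          · -- i5 at k+1
            intro z hz
            obtain ⟨x, hx, hxne, hznb⟩ := hP3 z (k + 2) (by
                have : k + 1 + 1 = k + 2 := by omega
                rw [← this]; exact hz) (by have := hI.i0a; omega)
            have hx1 : d x = some (k + 1) := by
              have : k + 2 - 1 = k + 1 := by omega
              rwa [this] at hx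
            have hxq : (x, k + 1, (0 : Int)) ∈ e :: R' := by
              rcases hI.i5 x hx1 with hmem | ⟨y, _, _, _, hymem⟩
              · exact hmem
              · exact absurd hymem (List.not_mem_nil)
            exact Or.inr ⟨x, hx1, hxne, hznb, hxq⟩
          · -- i8 at k+1
            intro z v hv
            have := hI.i8 z v hv; omega
        have hmeas : fuel * (K + 3).toNat + (K + 2 - (k + 1)).toNat ≤ m := by
          have h1 : (K + 2 - k).toNat ≥ 1 := by have := hI.i0b; omega
          omega
        have hN' : measN K (k + 1) (e :: R') [] ≤ fuel := by
          have : K + 2 - (k + 1) = K + 1 - k := by omega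
          simpa [measN, this] using hN
        have := ih fuel (k + 1) (e :: R') [] b p hmeas hshift hN'
        simpa using this
    | cons e Qk' =>
      subst hQ
      obtain ⟨rc, s, t⟩ := e
      obtain ⟨hs, ht, v0, hdv0, hv0le⟩ := hI.i1q (rc, s, t) List.mem_cons_self
      simp only at hs ht
      rw [hs, ht] at hI hN
      -- fuel is positive
      have ha1 : 1 ≤ (K + 2 - k).toNat := by have := hI.i0b; omega
      have hq1 : 1 ≤ 5 ^ (K + 1 - k).toNat := Nat.one_le_pow _ _ (by omega)
      have hpow : 5 ^ (K + 2 - k).toNat = 5 * 5 ^ (K + 1 - k).toNat := by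
        have : (K + 2 - k).toNat = (K + 1 - k).toNat + 1 := by omega
        rw [this, pow_succ]; ring
      rw [hs, ht]
      have hmp : 5 ^ (K + 2 - k).toNat ≤ measN K k ((rc, k, 0) :: Qk') Rq := by
        simp only [measN, List.length_cons]
        calc 5 ^ (K + 2 - k).toNat ≤ (Qk'.length + 1) * 5 ^ (K + 2 - k).toNat :=
              Nat.le_mul_of_pos_left _ (by omega)
          _ ≤ _ := Nat.le_add_right _ _
      cases fuel with
      | zero => omega
      | succ f =>
        rw [List.cons_append, loopA_cons]
        have hnorm : k + 0 * 1000 = k := by ring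
        rw [hnorm]
        -- measure for all recursive calls
        have hmea : f * (K + 3).toNat + (K + 2 - k).toNat ≤ m := by
          have hexp : (f + 1) * (K + 3).toNat = f * (K + 3).toNat + (K + 3).toNat := by ring
          rw [hexp] at hm
          omega
        -- base measN bound, as linear data
        have hNlin : (Qk'.length + 1) * (5 * 5 ^ (K + 1 - k).toNat) +
            Rq.length * 5 ^ (K + 1 - k).toNat ≤ f + 1 := by
          have heq2 : measN K k ((rc, k, 0) :: Qk') Rq =
              (Qk'.length + 1) * (5 * 5 ^ (K + 1 - k).toNat) +
              Rq.length * 5 ^ (K + 1 - k).toNat := by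
            simp [measN, List.length_cons, hpow]
          rw [← heq2]
          exact hN
        have hexpQ : (Qk'.length + 1) * (5 * 5 ^ (K + 1 - k).toNat) =
            Qk'.length * (5 * 5 ^ (K + 1 - k).toNat) + 5 * 5 ^ (K + 1 - k).toNat := by ring
        rw [hexpQ] at hNlin
        have hNskip : measN K k Qk' Rq ≤ f := by
          simp only [measN, hpow]
          omega
        cases hbg : b.get? rc with
        | some v =>
          have hdv : d rc = some v := hI.i2 rc v hbg
          have hvk : v ≤ k := hI.i8 rc v hbg
          by_cases hskip : k > v
          · -- stale entry: score strictly above recorded best, skip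
            rw [if_pos (by simpa using hskip)]
            refine ih f k Qk' Rq b p hmea ?_ hNskip
            refine ⟨hI.i0a, hI.i0b, fun e he => hI.i1q e (List.mem_cons_of_mem _ he), hI.i1r,
              hI.i2, hI.i3, ?_, ?_, hI.i6, hI.i7, hI.i8⟩
            · intro z hz
              rcases hI.i4 z hz with hb | hmem
              · exact Or.inl hb
              · rcases List.mem_cons.mp hmem with heq | hmem'
                · exfalso
                  have hzrc : z = rc := congrArg (fun q => q.1) heq
                  rw [hzrc, hdv] at hz
                  injection hz with hz'
                  omega
                · exact Or.inr hmem'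
            · intro z hz
              rcases hI.i5 z hz with hmem | ⟨x, hdx, hxne, hznb, hxmem⟩
              · exact Or.inl hmem
              · rcases List.mem_cons.mp hxmem with heq | hmem'
                · exfalso
                  have hxrc : x = rc := congrArg (fun q => q.1) heq
                  rw [hxrc, hdv] at hdx
                  injection hdx with hdx'
                  omega
                · exact Or.inr ⟨x, hdx, hxne, hznb, hmem'⟩
          · -- expand with v = k
            have hdk : d rc = some k := by
              have hvk' : v = k := by omega
              rwa [hvk'] at hdv
            rw [if_neg (by simpa using hskip)]
            exact expandStep grid end_ d K hP2 hP3 hK m ih f k Qk' Rq b p rc hmea hI hdk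
              hNlin hq1 hpow
        | none =>
          have hdk : d rc = some k := by
            rcases lt_or_eq_of_le hv0le with hlt | heq
            · exfalso
              have := hI.i3 rc v0 hdv0 hlt
              rw [hbg] at this
              exact absurd this (by simp)
            · rwa [heq] at hdv0
          rw [if_neg (by simp)]
          exact expandStep grid end_ d K hP2 hP3 hK m ih f k Qk' Rq b p rc hmea hI hdk
            hNlin hq1 hpow

-- ---- the backtracking only looks at key membership and stored distances ----

lemma btLoop_congr {β β' : Type} (grid : List String) (start_ end_ : Int × Int)
    (p1 : PySem.Dict (Int × Int) β) (p2 : PySem.Dict (Int × Int) β')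
    (b1 b2 : PySem.Dict (Int × Int) Int)
    (hp : ∀ z, p1.contains z = p2.contains z) (hb : ∀ z, b1.get? z = b2.get? z) :
    ∀ (fuel : Nat) (stack : List (Int × Int)) (tiles : PySem.Set (Int × Int)),
      btLoop grid start_ end_ p1 b1 fuel stack tiles =
      btLoop grid start_ end_ p2 b2 fuel stack tiles := by
  intro fuel
  induction fuel with
  | zero => intro stack tiles; rfl
  | succ f ih =>
    intro stack tiles
    cases stack with
    | nil => rfl
    | cons curr st =>
      show (if PySem.Set.contains tiles curr then _ else _) = (if PySem.Set.contains tiles curr then _ else _)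
      by_cases hc : PySem.Set.contains tiles curr
      · simp only [hc, if_true]; exact ih st tiles
      · simp only [hc, if_false, Bool.false_eq_true]
        by_cases hs : curr = start_
        · simp only [hs, if_true]; exact ih st _
        · simp only [hs, if_false]
          have hfil : (nbrs grid curr.1 curr.2).filter (fun n =>
              p1.contains n && (match b1.get? n, b1.get? curr with
                | some a, some bb => decide (a + 1 = bb) | _, _ => false)) =
              (nbrs grid curr.1 curr.2).filter (fun n =>
              p2.contains n && (match b2.get? n, b2.get? curr with
                | some a, some bb => decide (a + 1 = bb) | _, _ => false)) := by
            refine List.filter_congr (fun n _ => ?_)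
            rw [hp n, hb n, hb curr]
          rw [hfil]
          exact ih _ _

-- ===== VERDICT (by name: the statement is the Claim_ definition above) =====
lemma init_get? (start z : Int × Int) :
    ((PySem.Dict.empty).insert start (0 : Int)).get? z =
      if z = start then some 0 else none := by
  rw [PySem.Dict.get?_insert]
  split
  · rfl
  · exact PySem.Dict.get?_empty _

theorem bfs_find_best_paths_spec : Claim_equal_bfs_find_best_paths := by
  intro grid start end_ _ _
  unfold Spec_bfs_find_best_paths bfs_find_best_paths bfs_find_best_paths_alt
  dsimp only
  set RC : Nat := grid.length * (grid.headD "").toList.length with hRC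
  set V0 : PySem.Dict (Int × Int) Int := (PySem.Dict.empty).insert start 0 with hV0
  set W : PySem.Dict (Int × Int) Int := bLoop grid end_ (RC + 2) V0 [start] 0 with hW
  have hKnn : (0 : Int) ≤ ((RC : Nat) : Int) + 2 := by positivity
  have hInvB : InvB grid start end_ V0 [start] 0 := by
    refine ⟨le_refl 0, ?_, ?_, ?_, ?_, ?_, ?_, ?_⟩
    · intro x hx
      rcases List.mem_singleton.mp hx with rfl
      rw [init_get?]; simp
    · intro z v h
      rw [init_get?] at h
      split at h
      · next hzs => injection h with h'; exact ⟨by omega, by omega, by omega, fun _ => hzs⟩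
      · exact absurd h (by simp)
    · rw [init_get?]; simp
    · intro z h
      rw [init_get?] at h
      split at h
      · next hzs => simp [hzs]
      · exact absurd h (by simp)
    · intro x v h hvlt _
      rw [init_get?] at h
      split at h
      · injection h with h'; omega
      · exact absurd h (by simp)
    · intro z v h h1
      rw [init_get?] at h
      split at h
      · injection h with h'; omega
      · exact absurd h (by simp)
    · intro _
      have := muV_le grid V0
      omega
  have hsufB : 2 + muV grid V0 ≤ RC + 2 := by
    have := muV_le grid V0
    omega
  obtain ⟨c0, c1, c2, c3⟩ := bLoop_master grid start end_ (RC + 2) V0 [start] 0 hInvB hsufB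
  set d : Int × Int → Option Int := fun z => W.get? z with hd
  set K : Int := ((RC : Nat) : Int) + 2 with hK'
  have hK0 : 0 ≤ K := hKnn
  have hP2 : ∀ x v, d x = some v → x ≠ end_ →
      ∀ z ∈ nbrs grid x.1 x.2, ∃ w, d z = some w ∧ w ≤ v + 1 := fun x v h => c2 x v h
  have hP3 : ∀ z v, d z = some v → 1 ≤ v →
      ∃ x, d x = some (v - 1) ∧ x ≠ end_ ∧ z ∈ nbrs grid x.1 x.2 := fun z v h => c3 z v h
  have hKb : ∀ z v, d z = some v → v ≤ K := fun z v h => (c0 z v h).2.1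
  have hInvA : InvA grid end_ d K 0 [(start, 0, 0)] [] PySem.Dict.empty PySem.Dict.empty := by
    refine ⟨le_refl 0, by omega, ?_, by simp, ?_, ?_, ?_, ?_, ?_, by simp, ?_⟩
    · intro e he
      rcases List.mem_singleton.mp he with rfl
      exact ⟨rfl, rfl, 0, c1, le_refl 0⟩
    · intro z v h
      rw [PySem.Dict.get?_empty] at h
      exact absurd h (by simp)
    · intro z v h hvlt
      have := (c0 z v h).1
      omega
    · intro z hz
      have hzs : z = start := (c0 z 0 hz).2.2 rfl
      exact Or.inr (by rw [hzs]; exact List.mem_singleton.mpr rfl)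
    · intro z hz
      obtain ⟨x, hx, hxne, hznb⟩ := hP3 z 1 (by simpa using hz) (le_refl 1)
      have hx0 : d x = some 0 := by simpa using hx
      have hxs : x = start := (c0 x 0 hx0).2.2 rfl
      exact Or.inr ⟨x, hx0, hxne, hznb, by rw [hxs]; exact List.mem_singleton.mpr rfl⟩
    · intro z
      rw [PySem.Dict.get?_empty, PySem.Dict.get?_empty]
      rfl
    · intro z v h
      rw [PySem.Dict.get?_empty] at h
      exact absurd h (by simp)
  have hNinit : measN K 0 [(start, 0, 0)] [] ≤ 5 ^ (RC + 5) := by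
    have hmeq : measN K 0 [(start, 0, 0)] [] = 5 ^ ((K + 2 - 0).toNat) := by
      simp [measN]
    have ht : (K + 2 - 0).toNat = RC + 4 := by omega
    rw [hmeq, ht]
    exact Nat.pow_le_pow_right (by norm_num) (by omega)
  obtain ⟨ha1, ha2⟩ := loopA_master grid end_ d K hK0 hP2 hP3 hKb
    (5 ^ (RC + 5) * (K + 3).toNat + (K + 2 - 0).toNat) (5 ^ (RC + 5)) 0
    [(start, 0, 0)] [] PySem.Dict.empty PySem.Dict.empty (le_refl _) hInvA hNinit
  rw [List.append_nil] at ha1 ha2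
  refine btLoop_congr grid start end_ _ W _ W ?_ ?_ (4 * RC + 6) [end_] PySem.Set.empty
  · intro z
    rw [PySem.Dict.contains_eq_isSome_get?, PySem.Dict.contains_eq_isSome_get?, ha2 z]
  · exact ha1
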